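-- pv_equiv track=rewrite | github.com/steviedale/lingo_kit_data | utils/add_pronunciation_column.py | map_vowel
-- ===== SOURCE A (Python) =====
-- import unicodedata
--
-- NUCLEUS_MAP = {
--     'ia': 'yah',
--     'ie': 'yeh',
--     'io': 'yoh',
--     'iu': 'yoo',
--     'ua': 'wah',
--     'uo': 'woh',
--     'ui': 'wee',
--     'ue': 'weh',
--     'ai': 'eye',
--     'ei': 'ay',
--     'oi': 'oy',
--     'au': 'ow',
--     'eu': 'eh-oo',
-- }
--
-- def strip_accents(text: str) -> str:
--     return ''.join(ch for ch in unicodedata.normalize('NFD', text) if unicodedata.category(ch) != 'Mn')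
--
-- def map_vowel(nucleus: str) -> str:
--     if not nucleus:
--         return ''
--     nucleus_norm = strip_accents(nucleus.lower())
--     if nucleus_norm in NUCLEUS_MAP:
--         return NUCLEUS_MAP[nucleus_norm]
--     for length in range(len(nucleus_norm), 1, -1):
--         prefix = nucleus_norm[:length]
--         if prefix in NUCLEUS_MAP:
--             rest = nucleus[length:]
--             return NUCLEUS_MAP[prefix] + map_vowel(rest)
--     result = ''
--     for ch in nucleus:
--         base = strip_accents(ch.lower())
--         if base == 'a':
--             result += 'ah'
--         elif base == 'e':
--             result += 'eh'
--         elif base == 'i':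
--             result += 'ee'
--         elif base == 'o':
--             result += 'oh'
--         elif base == 'u':
--             result += 'oo'
--         elif base == 'y':
--             result += 'ee'
--         else:
--             result += base
--     return result
-- ===== SOURCE B (Python) =====
-- NUCLEUS_MAP = {
--     'ia': 'yah', 'ie': 'yeh', 'io': 'yoh', 'iu': 'yoo',
--     'ua': 'wah', 'uo': 'woh', 'ui': 'wee', 'ue': 'weh',
--     'ai': 'eye', 'ei': 'ay', 'oi': 'oy', 'au': 'ow', 'eu': 'eh-oo',
-- }
--
-- _FALLBACK = {'a': 'ah', 'e': 'eh', 'i': 'ee', 'o': 'oh', 'u': 'oo', 'y': 'ee'}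
--
--
-- def map_vowel(nucleus: str) -> str:
--     # Iterative single pass: every key of NUCLEUS_MAP has length two, so the
--     # original's descending prefix scan can only ever hit the leading pair.
--     # Consume known pairs from the front; on the first non-matching front pair
--     # spell out the whole remainder character by character.
--     out = []
--     i = 0
--     n = len(nucleus)
--     while i < n:
--         pair = nucleus[i:i + 2].lower()
--         if pair in NUCLEUS_MAP:
--             out.append(NUCLEUS_MAP[pair])
--             i += 2
--         else:
--             for ch in nucleus[i:]:
--                 b = ch.lower()
--                 out.append(_FALLBACK.get(b, b))
--             break
--     return ''.join(out)
-- ===== Notes on version B (the rewrite author's own statement) =====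
-- stated objective: alternative
-- what changed: Replaces A's recursion with a per-call descending prefix scan (range(len,1,-1)) by a single iterative front-to-back loop that consumes known two-letter pairs, exploiting that every NUCLEUS_MAP key has length 2; accents need no stripping on the ASCII domain.
import Mathlib
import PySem

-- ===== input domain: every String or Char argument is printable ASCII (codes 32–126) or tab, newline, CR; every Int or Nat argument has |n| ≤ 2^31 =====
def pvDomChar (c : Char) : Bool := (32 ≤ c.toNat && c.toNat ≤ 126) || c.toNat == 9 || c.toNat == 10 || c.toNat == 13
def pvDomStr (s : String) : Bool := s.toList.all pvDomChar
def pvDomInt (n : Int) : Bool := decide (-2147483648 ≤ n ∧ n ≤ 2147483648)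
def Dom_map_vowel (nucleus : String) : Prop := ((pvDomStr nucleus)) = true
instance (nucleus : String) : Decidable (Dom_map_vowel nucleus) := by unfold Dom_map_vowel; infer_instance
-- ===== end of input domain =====

-- B replaces A's recursion with a descending prefix scan by a single iterative front-to-back
-- pass consuming two-letter pairs (alternative decomposition, same cost; every key has length 2).

-- ===== PORT A =====
def NUCLEUS_MAP : PySem.Dict String String := PySem.Dict.ofList
  [("ia","yah"),("ie","yeh"),("io","yoh"),("iu","yoo"),("ua","wah"),("uo","woh"),
   ("ui","wee"),("ue","weh"),("ai","eye"),("ei","ay"),("oi","oy"),("au","ow"),("eu","eh-oo")]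

-- strip_accents: exact on the ASCII input domain, where NFD is the identity and no character
-- has Unicode category Mn, so the function is the identity.
def stripAccents (cs : List Char) : List Char := cs

-- the body of A's per-character fallback loop ('result += …')
def fallbackStepA (acc : List Char) (ch : Char) : List Char :=
  let base := stripAccents (PySem.Chars.lower [ch])
  if base = ['a'] then acc ++ ['a','h']
  else if base = ['e'] then acc ++ ['e','h']
  else if base = ['i'] then acc ++ ['e','e']
  else if base = ['o'] then acc ++ ['o','h']
  else if base = ['u'] then acc ++ ['o','o']
  else if base = ['y'] then acc ++ ['e','e']
  else acc ++ base

-- A's 'for length in range(len(nucleus_norm), 1, -1)' loop: first prefix of norm that is a key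
def prefixScanA (norm : List Char) : List Int → Option (String × Int)
  | [] => none
  | l :: ls =>
    let pre := PySem.List.slice norm none (some l)
    match NUCLEUS_MAP.get? (String.ofList pre) with
    | some v => some (v, l)
    | none => prefixScanA norm ls

def mapVowelA : Nat → List Char → String
  | 0, _ => ""    -- fuel, never reached: each recursive call removes at least two characters
  | fuel+1, nucleus =>
    if nucleus = [] then ""
    else
      let norm := stripAccents (PySem.Chars.lower nucleus)
      match NUCLEUS_MAP.get? (String.ofList norm) with
      | some v => v
      | none =>
        match prefixScanA norm (PySem.List.pyRange (norm.length : Int) 1 (-1)) with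
        | some (v, l) => v ++ mapVowelA fuel (PySem.List.slice nucleus (some l) none)
        | none => String.ofList (nucleus.foldl fallbackStepA [])

def map_vowel (nucleus : String) : String := mapVowelA (nucleus.toList.length + 1) nucleus.toList

-- ===== PORT B =====
def FALLBACK_MAP : PySem.Dict String String := PySem.Dict.ofList
  [("a","ah"),("e","eh"),("i","ee"),("o","oh"),("u","oo"),("y","ee")]

-- '_FALLBACK.get(b, b)' with b = ch.lower()
def fallbackB (ch : Char) : String :=
  let b := String.ofList (PySem.Chars.lower [ch])
  PySem.Dict.getD FALLBACK_MAP b b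

-- Source B's while loop: 'pair = nucleus[i:i+2].lower()', consume it if it is a key,
-- otherwise append the per-character fallback of the whole remainder and stop.
def mapVowelB : List Char → List String → List String
  | [], out => out
  | c :: rest, out =>
    let pair := PySem.Chars.lower (c :: rest.take 1)
    match NUCLEUS_MAP.get? (String.ofList pair) with
    | some v => mapVowelB (rest.drop 1) (out ++ [v])
    | none => out ++ (c :: rest).map fallbackB
termination_by cs _ => cs.length
decreasing_by simp

def map_vowel_alt (nucleus : String) : String := PySem.Str.join "" (mapVowelB nucleus.toList [])

-- ===== PRECONDITION & SPEC =====
def Spec_map_vowel (nucleus : String) (out : String) : Prop := out = map_vowel_alt nucleus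
instance (nucleus : String) (out : String) : Decidable (Spec_map_vowel nucleus out) := by unfold Spec_map_vowel; infer_instance

-- ===== CLAIM (what is proved, stated in full; the proofs are below) =====
def Claim_equal_map_vowel : Prop := ∀ (nucleus : String), Dom_map_vowel nucleus → Spec_map_vowel nucleus (map_vowel nucleus)

-- ===== LEMMAS AND PROOFS =====

lemma ofList_single_inj {b c : Char} (h : String.ofList [b] = String.ofList [c]) : b = c := by
  have h2 := congrArg String.toList h
  simpa using h2

lemma join_nilsep : ∀ ls : List (List Char), PySem.Chars.join [] ls = ls.flatten
  | [] => PySem.Chars.join_nil []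
  | [p] => by simp [PySem.Chars.join_singleton]
  | p :: q :: rest => by
      rw [PySem.Chars.join_cons_cons]
      simp [join_nilsep (q :: rest)]

lemma strJoin_empty (xs : List String) :
    PySem.Str.join "" xs = String.ofList (xs.map String.toList).flatten := by
  simp [PySem.Str.join, join_nilsep]

lemma strJoin_empty_nil : PySem.Str.join "" [] = "" := by
  simp [strJoin_empty]

lemma strJoin_empty_cons (x : String) (xs : List String) :
    PySem.Str.join "" (x :: xs) = x ++ PySem.Str.join "" xs := by
  simp [strJoin_empty]

-- any string found in one of the two literal dicts is one of its keys
lemma get?_key_mem {κ ν : Type} [BEq κ] [LawfulBEq κ] (d : PySem.Dict κ ν) {s : κ} {v : ν}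
    (h : d.get? s = some v) : s ∈ d.items.map (·.1) := by
  unfold PySem.Dict.get? at h
  rcases Option.map_eq_some_iff.mp h with ⟨p, hfind, -⟩
  have hb : p.1 = s := by simpa using List.find?_some hfind
  exact hb ▸ List.mem_map_of_mem (List.mem_of_find?_eq_some hfind)

-- every key of NUCLEUS_MAP has two characters
lemma nucleus_key_len {s v : String} (h : NUCLEUS_MAP.get? s = some v) : s.toList.length = 2 := by
  have hm := get?_key_mem NUCLEUS_MAP h
  have hk : NUCLEUS_MAP.items.map (·.1) =
      ["ia","ie","io","iu","ua","uo","ui","ue","ai","ei","oi","au","eu"] := by decide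
  rw [hk] at hm
  fin_cases hm <;> decide

-- characters other than aeiouy are absent from FALLBACK_MAP
lemma fallback_get?_none {b : Char} (h : b ∉ (['a','e','i','o','u','y'] : List Char)) :
    FALLBACK_MAP.get? (String.ofList [b]) = none := by
  cases hg : FALLBACK_MAP.get? (String.ofList [b]) with
  | none => rfl
  | some v =>
    exfalso
    have hm := get?_key_mem FALLBACK_MAP hg
    have hk : FALLBACK_MAP.items.map (·.1) = ["a","e","i","o","u","y"] := by decide
    rw [hk] at hm
    apply h
    simp only [List.mem_cons, List.not_mem_nil, or_false] at hm
    simp only [List.mem_cons, List.not_mem_nil, or_false]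
    rcases hm with h1|h1|h1|h1|h1|h1
    · exact Or.inl (ofList_single_inj (h1.trans (by decide : ("a":String) = String.ofList ['a'])))
    · exact Or.inr (Or.inl (ofList_single_inj (h1.trans (by decide : ("e":String) = String.ofList ['e']))))
    · exact Or.inr (Or.inr (Or.inl (ofList_single_inj (h1.trans (by decide : ("i":String) = String.ofList ['i'])))))
    · exact Or.inr (Or.inr (Or.inr (Or.inl (ofList_single_inj (h1.trans (by decide : ("o":String) = String.ofList ['o']))))))
    · exact Or.inr (Or.inr (Or.inr (Or.inr (Or.inl (ofList_single_inj (h1.trans (by decide : ("u":String) = String.ofList ['u'])))))))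
    · exact Or.inr (Or.inr (Or.inr (Or.inr (Or.inr (ofList_single_inj (h1.trans (by decide : ("y":String) = String.ofList ['y'])))))))

-- per-character agreement of the two fallback bodies
lemma fallback_char (acc : List Char) (ch : Char) :
    fallbackStepA acc ch = acc ++ (fallbackB ch).toList := by
  unfold fallbackStepA fallbackB stripAccents
  simp only [PySem.Chars.lower, List.map_cons, List.map_nil]
  by_cases h1 : PySem.Chars.lowerChar ch = 'a'
  · have e : (PySem.Dict.getD FALLBACK_MAP (String.ofList ['a']) (String.ofList ['a'])).toList = ['a','h'] := by decide
    simp [h1, e]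
  by_cases h2 : PySem.Chars.lowerChar ch = 'e'
  · have e : (PySem.Dict.getD FALLBACK_MAP (String.ofList ['e']) (String.ofList ['e'])).toList = ['e','h'] := by decide
    simp [h2, e]
  by_cases h3 : PySem.Chars.lowerChar ch = 'i'
  · have e : (PySem.Dict.getD FALLBACK_MAP (String.ofList ['i']) (String.ofList ['i'])).toList = ['e','e'] := by decide
    simp [h3, e]
  by_cases h4 : PySem.Chars.lowerChar ch = 'o'
  · have e : (PySem.Dict.getD FALLBACK_MAP (String.ofList ['o']) (String.ofList ['o'])).toList = ['o','h'] := by decide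
    simp [h4, e]
  by_cases h5 : PySem.Chars.lowerChar ch = 'u'
  · have e : (PySem.Dict.getD FALLBACK_MAP (String.ofList ['u']) (String.ofList ['u'])).toList = ['o','o'] := by decide
    simp [h5, e]
  by_cases h6 : PySem.Chars.lowerChar ch = 'y'
  · have e : (PySem.Dict.getD FALLBACK_MAP (String.ofList ['y']) (String.ofList ['y'])).toList = ['e','e'] := by decide
    simp [h6, e]
  have hmem : PySem.Chars.lowerChar ch ∉ (['a','e','i','o','u','y'] : List Char) := by
    simp [h1, h2, h3, h4, h5, h6]
  have e := fallback_get?_none hmem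
  simp [h1, h2, h3, h4, h5, h6, PySem.Dict.getD, e]

-- both fallback loops produce the same string
lemma fallback_all (cs : List Char) :
    String.ofList (cs.foldl fallbackStepA []) = PySem.Str.join "" (cs.map fallbackB) := by
  have h1 : cs.foldl fallbackStepA [] = cs.foldl (fun acc ch => acc ++ (fallbackB ch).toList) [] :=
    PySem.List.foldl_congr_mem _ _ _ _ (fun acc x _ => fallback_char acc x)
  rw [h1, PySem.List.foldl_append_eq_flatMap]
  simp [strJoin_empty, List.flatMap_def, List.map_map]
  rfl

-- range(n, 1, -1) is exactly the integers from n down to 2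
lemma mem_pyRange_desc (m : Nat) (x : Int) :
    x ∈ PySem.List.pyRange (m : Int) 1 (-1) ↔ 2 ≤ x ∧ x ≤ (m : Int) := by
  simp only [PySem.List.pyRange]
  norm_num
  by_cases h1 : 1 < m
  · simp only [if_pos h1]
    constructor
    · rintro ⟨k, hk, hx⟩; omega
    · rintro ⟨h2, hm⟩; exact ⟨((m : Int) - x).toNat, by omega, by omega⟩
  · simp only [if_neg h1]
    constructor
    · rintro ⟨k, hk, hx⟩; omega
    · rintro ⟨h2, hm⟩; omega

-- the descending prefix scan can only hit at length 2
lemma prefixScanA_eq (norm : List Char) (L : List Int)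
    (hL : ∀ l ∈ L, 2 ≤ l ∧ l ≤ (norm.length : Int)) :
    prefixScanA norm L =
      if (2 : Int) ∈ L
      then (NUCLEUS_MAP.get? (String.ofList (norm.take 2))).map (fun v => (v, (2 : Int)))
      else none := by
  induction L with
  | nil => simp [prefixScanA]
  | cons l ls ih =>
    obtain ⟨hl2, hln⟩ := hL l List.mem_cons_self
    have hslice : PySem.List.slice norm none (some l) = norm.take l.toNat :=
      PySem.List.slice_to norm (by omega)
    by_cases hl : l = 2
    · subst hl
      simp only [prefixScanA, hslice, show ((2:Int).toNat) = 2 from rfl]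
      cases hg : NUCLEUS_MAP.get? (String.ofList (norm.take 2)) with
      | some v => simp
      | none =>
        rw [ih (fun l hl => hL l (List.mem_cons_of_mem _ hl))]
        simp [hg]
    · have hnone : NUCLEUS_MAP.get? (String.ofList (norm.take l.toNat)) = none := by
        cases hg : NUCLEUS_MAP.get? (String.ofList (norm.take l.toNat)) with
        | none => rfl
        | some v =>
          exfalso
          have hlen2 := nucleus_key_len hg
          simp [List.length_take] at hlen2
          omega
      simp only [prefixScanA, hslice, hnone]
      rw [ih (fun l hl => hL l (List.mem_cons_of_mem _ hl))]
      have h2l : ((2:Int) ∈ l :: ls) ↔ ((2:Int) ∈ ls) := by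
        constructor
        · intro h
          rcases List.mem_cons.mp h with h|h
          · exact absurd h.symm hl
          · exact h
        · exact List.mem_cons_of_mem l
      simp only [h2l]

-- accumulator lemma for B's loop
lemma mapVowelB_acc : ∀ (n : Nat) (cs : List Char) (out : List String), cs.length ≤ n →
    mapVowelB cs out = out ++ mapVowelB cs []
  | 0, cs, out, h => by
    have : cs = [] := List.length_eq_zero_iff.mp (Nat.le_zero.mp h)
    subst this; simp [mapVowelB]
  | n+1, [], out, h => by simp [mapVowelB]
  | n+1, c :: rest, out, h => by
    simp only [mapVowelB]
    cases hg : NUCLEUS_MAP.get? (String.ofList (PySem.Chars.lower (c :: rest.take 1))) with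
    | some v =>
      have e1 := mapVowelB_acc n rest.tail (out ++ [v]) (by simp at h ⊢; omega)
      have e2 := mapVowelB_acc n rest.tail [v] (by simp at h ⊢; omega)
      simp [e1, e2]
    | none => simp

-- main equivalence, by strong induction on the length
lemma mainEq : ∀ (n : Nat) (cs : List Char) (fuel : Nat), cs.length ≤ n → cs.length < fuel →
    mapVowelA fuel cs = PySem.Str.join "" (mapVowelB cs []) := by
  intro n
  induction n with
  | zero =>
    intro cs fuel hn hf
    obtain rfl : cs = [] := List.length_eq_zero_iff.mp (Nat.le_zero.mp hn)
    obtain ⟨f, rfl⟩ : ∃ f, fuel = f + 1 := ⟨fuel - 1, by omega⟩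
    simp [mapVowelA, mapVowelB, strJoin_empty_nil]
  | succ n ih =>
    intro cs fuel hn hf
    cases cs with
    | nil =>
      obtain ⟨f, rfl⟩ : ∃ f, fuel = f + 1 := ⟨fuel - 1, by omega⟩
      simp [mapVowelA, mapVowelB, strJoin_empty_nil]
    | cons c rest =>
      obtain ⟨f, rfl⟩ : ∃ f, fuel = f + 1 := ⟨fuel - 1, by omega⟩
      simp only [mapVowelA, stripAccents, if_neg (List.cons_ne_nil c rest)]
      have hlen : (PySem.Chars.lower (c :: rest)).length = rest.length + 1 := by
        simp [PySem.Chars.lower]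
      cases hg : NUCLEUS_MAP.get? (String.ofList (PySem.Chars.lower (c :: rest))) with
      | some v =>
        have h2 : (PySem.Chars.lower (c :: rest)).length = 2 := by
          have := nucleus_key_len hg
          simpa using this
        rw [hlen] at h2
        cases rest with
        | nil => simp at h2
        | cons r rest2 =>
          have hrest2 : rest2 = [] := by simpa using h2
          subst hrest2
          have hv : v ++ "" = v := by apply String.toList_inj.mp; simp
          simp [mapVowelB, hg, strJoin_empty_cons, strJoin_empty_nil, hv]
      | none =>
        have hr : ∀ l ∈ PySem.List.pyRange ((PySem.Chars.lower (c :: rest)).length : Int) 1 (-1),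
            2 ≤ l ∧ l ≤ ((PySem.Chars.lower (c :: rest)).length : Int) := by
          intro l hl
          rw [hlen] at hl ⊢
          exact (mem_pyRange_desc (rest.length + 1) l).mp hl
        rw [prefixScanA_eq _ _ hr]
        cases rest with
        | nil =>
          have hnot : ¬ ((2:Int) ∈ PySem.List.pyRange
              ((PySem.Chars.lower [c]).length : Int) 1 (-1)) := by
            intro hmem
            rw [hlen] at hmem
            have h9 := (mem_pyRange_desc (List.length ([] : List Char) + 1) 2).mp hmem
            norm_num at h9
          rw [if_neg hnot]
          simp only [mapVowelB, List.take_nil, hg, List.nil_append]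
          simpa using fallback_all [c]
        | cons r rest2 =>
          have h2mem : (2:Int) ∈ PySem.List.pyRange
              ((PySem.Chars.lower (c :: r :: rest2)).length : Int) 1 (-1) := by
            rw [hlen]
            exact (mem_pyRange_desc ((r :: rest2).length + 1) 2).mpr
              ⟨by norm_num, by simp; omega⟩
          rw [if_pos h2mem]
          have hpair : (PySem.Chars.lower (c :: r :: rest2)).take 2 = PySem.Chars.lower [c, r] := by
            simp [PySem.Chars.lower]
          rw [hpair]
          cases hg2 : NUCLEUS_MAP.get? (String.ofList (PySem.Chars.lower [c, r])) with
          | some v =>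
            have hslice : PySem.List.slice (c :: r :: rest2) (some 2) none = rest2 := by
              rw [PySem.List.slice_from (c :: r :: rest2) (show (0:Int) ≤ 2 by norm_num)]
              rfl
            have hih := ih rest2 f (by simp at hn; omega) (by simp at hf; omega)
            have hacc := mapVowelB_acc rest2.length rest2 [v] le_rfl
            simp [mapVowelB, hg2, hslice, hih, hacc, strJoin_empty_cons]
          | none =>
            simp only [Option.map_none]
            have hfb := fallback_all (c :: r :: rest2)
            simp only [mapVowelB, List.take_succ_cons, List.take_zero, hg2, List.nil_append]
            simpa using hfb

-- ===== VERDICT (by name: the statement is the Claim_ definition above) =====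
theorem map_vowel_spec : Claim_equal_map_vowel := by
  intro nucleus _
  unfold Spec_map_vowel map_vowel map_vowel_alt
  exact mainEq (nucleus.toList.length) nucleus.toList (nucleus.toList.length + 1) le_rfl (by omega)
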